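-- pv_equiv track=rewrite | github.com/OliverOnForge/vecswap | swaper/tools.py | interleave_from
-- ===== SOURCE A (Python) =====
-- def interleave_from(vector_a: list, vector_b: list, start_index: int):
--     """
--     Interleaves vector_b into vector_a starting from start_index.
--     Alternates one element from vector_a and one from vector_b.
--     """
--     result = vector_a[:start_index]
--     rest_a = vector_a[start_index:]
--
--     # Interleave while both lists have elements
--     i = 0
--     while i < len(rest_a) or i < len(vector_b):
--         if i < len(rest_a):
--             result.append(rest_a[i])
--         if i < len(vector_b):
--             result.append(vector_b[i])
--         i += 1
--
--     return result
-- ===== SOURCE B (Python) =====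
-- from collections import deque
--
-- def interleave_from(vector_a: list, vector_b: list, start_index: int):
--     # Role-swapping merge: always take from xs, then swap the two queues.
--     # The single loop condition handles both interleaving and either leftover tail.
--     result = vector_a[:start_index]
--     xs = deque(vector_a[start_index:])
--     ys = deque(vector_b)
--     while xs:
--         result.append(xs.popleft())
--         xs, ys = ys, xs
--     result.extend(ys)
--     return result
-- ===== Notes on version B (the rewrite author's own statement) =====
-- stated objective: alternative
-- what changed: Replaces the index-driven while loop with two per-iteration bound guards by a role-swapping merge over two deques (take the head of xs, then swap xs and ys), whose single loop condition handles both interleaving and either leftover tail.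
import Mathlib
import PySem

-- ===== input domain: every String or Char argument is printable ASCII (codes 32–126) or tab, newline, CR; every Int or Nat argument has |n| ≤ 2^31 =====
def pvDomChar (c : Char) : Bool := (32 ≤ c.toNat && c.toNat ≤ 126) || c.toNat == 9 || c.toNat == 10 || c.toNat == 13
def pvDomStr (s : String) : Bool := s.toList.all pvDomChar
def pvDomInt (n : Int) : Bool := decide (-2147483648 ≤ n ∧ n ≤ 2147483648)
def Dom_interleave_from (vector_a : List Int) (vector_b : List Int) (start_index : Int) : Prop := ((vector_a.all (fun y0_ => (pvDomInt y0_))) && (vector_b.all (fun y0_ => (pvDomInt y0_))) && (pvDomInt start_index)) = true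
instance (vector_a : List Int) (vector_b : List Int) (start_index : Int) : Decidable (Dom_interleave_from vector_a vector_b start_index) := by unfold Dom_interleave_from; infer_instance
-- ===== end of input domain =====

-- B replaces A's index-driven while loop by a role-swapping recursion (different decomposition, same cost class).

-- ===== PORT A =====
-- while loop over index i with two per-list bound guards, transliterated as recursion on i
def interleaveALoop (ra vb : List Int) (i : Nat) : List Int :=
  if _h : i < ra.length ∨ i < vb.length then
    (if i < ra.length then [ra.getD i 0] else []) ++
    (if i < vb.length then [vb.getD i 0] else []) ++
    interleaveALoop ra vb (i + 1)
  else []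
termination_by max ra.length vb.length - i
decreasing_by omega

def interleave_from (vector_a : List Int) (vector_b : List Int) (start_index : Int) : List Int :=
  PySem.List.slice vector_a none (some start_index) ++
    interleaveALoop (PySem.List.slice vector_a (some start_index) none) vector_b 0

-- ===== PORT B =====
-- role-swapping merge loop over two queues: pop the head of xs into the
-- accumulator, then swap xs and ys; when xs is empty, extend with ys
def mergeLoop : List Int → List Int → List Int → List Int
  | [], ys, result => result ++ ys
  | x :: xs, ys, result => mergeLoop ys xs (result ++ [x])
termination_by xs ys _ => xs.length + ys.length

def interleave_from_alt (vector_a : List Int) (vector_b : List Int) (start_index : Int) : List Int :=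
  mergeLoop (PySem.List.slice vector_a (some start_index) none) vector_b
    (PySem.List.slice vector_a none (some start_index))

-- ===== PRECONDITION & SPEC =====
def Spec_interleave_from (vector_a : List Int) (vector_b : List Int) (start_index : Int) (out : List Int) : Prop := out = interleave_from_alt vector_a vector_b start_index
instance (vector_a : List Int) (vector_b : List Int) (start_index : Int) (out : List Int) : Decidable (Spec_interleave_from vector_a vector_b start_index out) := by unfold Spec_interleave_from; infer_instance

-- ===== CLAIM (what is proved, stated in full; the proofs are below) =====
def Claim_equal_interleave_from : Prop := ∀ (vector_a : List Int) (vector_b : List Int) (start_index : Int), Dom_interleave_from vector_a vector_b start_index → Spec_interleave_from vector_a vector_b start_index (interleave_from vector_a vector_b start_index)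

-- ===== LEMMAS AND PROOFS =====

-- proof-side characterisation of the role-swapping merge without the accumulator
def mergeAlt : List Int → List Int → List Int
  | [], ys => ys
  | x :: xs, ys => x :: mergeAlt ys xs
termination_by xs ys => xs.length + ys.length

theorem mergeLoop_eq_aux (n : Nat) : ∀ (xs ys result : List Int),
    xs.length + ys.length ≤ n → mergeLoop xs ys result = result ++ mergeAlt xs ys := by
  induction n with
  | zero =>
    intro xs ys result h
    have hx : xs = [] := by apply List.eq_nil_of_length_eq_zero; omega
    subst hx
    rw [mergeLoop, mergeAlt]
  | succ n ih =>
    intro xs ys result h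
    cases xs with
    | nil => rw [mergeLoop, mergeAlt]
    | cons x xs =>
      rw [mergeLoop, mergeAlt]
      simp only [List.length_cons] at h
      rw [ih ys xs (result ++ [x]) (by omega)]
      simp

theorem mergeLoop_eq (xs ys result : List Int) :
    mergeLoop xs ys result = result ++ mergeAlt xs ys :=
  mergeLoop_eq_aux (xs.length + ys.length) xs ys result (le_refl _)

theorem getD_succ_tail (l : List Int) (i : Nat) : l.getD (i + 1) 0 = l.tail.getD i 0 := by
  cases l <;> simp [List.getD]

theorem interleaveALoop_shift_aux (k : Nat) : ∀ (ra vb : List Int) (i : Nat),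
    max ra.length vb.length ≤ i + 1 + k →
    interleaveALoop ra vb (i + 1) = interleaveALoop ra.tail vb.tail i := by
  induction k with
  | zero =>
    intro ra vb i h
    have h1 : ¬ (i + 1 < ra.length ∨ i + 1 < vb.length) := by omega
    have h2 : ¬ (i < ra.tail.length ∨ i < vb.tail.length) := by
      simp only [List.length_tail]; omega
    conv_lhs => rw [interleaveALoop]
    conv_rhs => rw [interleaveALoop]
    rw [dif_neg h1, dif_neg h2]
  | succ k ih =>
    intro ra vb i h
    conv_lhs => rw [interleaveALoop]
    conv_rhs => rw [interleaveALoop]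
    by_cases hc : i + 1 < ra.length ∨ i + 1 < vb.length
    · have hc' : i < ra.tail.length ∨ i < vb.tail.length := by
        simp only [List.length_tail]; omega
      rw [dif_pos hc, dif_pos hc']
      have e1 : (if i + 1 < ra.length then [ra.getD (i + 1) 0] else []) =
          (if i < ra.tail.length then [ra.tail.getD i 0] else []) := by
        by_cases h' : i + 1 < ra.length
        · rw [if_pos h', if_pos (by simp only [List.length_tail]; omega), getD_succ_tail]
        · rw [if_neg h', if_neg (by simp only [List.length_tail]; omega)]
      have e2 : (if i + 1 < vb.length then [vb.getD (i + 1) 0] else []) =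
          (if i < vb.tail.length then [vb.tail.getD i 0] else []) := by
        by_cases h' : i + 1 < vb.length
        · rw [if_pos h', if_pos (by simp only [List.length_tail]; omega), getD_succ_tail]
        · rw [if_neg h', if_neg (by simp only [List.length_tail]; omega)]
      rw [e1, e2, ih ra vb (i + 1) (by omega)]
    · have hc' : ¬ (i < ra.tail.length ∨ i < vb.tail.length) := by
        simp only [List.length_tail]; omega
      rw [dif_neg hc, dif_neg hc']

theorem interleaveALoop_shift (ra vb : List Int) (i : Nat) :
    interleaveALoop ra vb (i + 1) = interleaveALoop ra.tail vb.tail i :=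
  interleaveALoop_shift_aux (max ra.length vb.length) ra vb i (by omega)

theorem interleaveALoop_nil_left (vb : List Int) : interleaveALoop [] vb 0 = vb := by
  induction vb with
  | nil => rw [interleaveALoop]; simp
  | cons b vb ih =>
    rw [interleaveALoop]
    rw [dif_pos (by simp)]
    rw [show (0 : Nat) + 1 = 0 + 1 from rfl, interleaveALoop_shift]
    simp [List.getD, ih]

theorem interleaveALoop_nil_right (ra : List Int) : interleaveALoop ra [] 0 = ra := by
  induction ra with
  | nil => rw [interleaveALoop]; simp
  | cons a ra ih =>
    rw [interleaveALoop]
    rw [dif_pos (by simp)]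
    rw [interleaveALoop_shift]
    simp [List.getD, ih]

theorem interleaveALoop_cons_cons (a b : Int) (ra vb : List Int) :
    interleaveALoop (a :: ra) (b :: vb) 0 = a :: b :: interleaveALoop ra vb 0 := by
  rw [interleaveALoop]
  rw [dif_pos (by simp)]
  rw [interleaveALoop_shift]
  simp [List.getD]

theorem interleaveALoop_eq_mergeAlt_aux (n : Nat) : ∀ (ra vb : List Int),
    ra.length + vb.length ≤ n → interleaveALoop ra vb 0 = mergeAlt ra vb := by
  induction n with
  | zero =>
    intro ra vb h
    have : ra = [] ∧ vb = [] := by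
      constructor <;> (apply List.eq_nil_of_length_eq_zero; omega)
    obtain ⟨h1, h2⟩ := this
    subst h1; subst h2
    rw [interleaveALoop]; simp [mergeAlt]
  | succ n ih =>
    intro ra vb h
    cases ra with
    | nil => rw [interleaveALoop_nil_left, mergeAlt]
    | cons a ra =>
      cases vb with
      | nil =>
        rw [interleaveALoop_nil_right]
        show a :: ra = mergeAlt (a :: ra) []
        rw [mergeAlt]
        cases ra <;> simp [mergeAlt]
      | cons b vb =>
        rw [interleaveALoop_cons_cons]
        rw [mergeAlt, mergeAlt]
        simp only [List.length_cons] at h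
        rw [ih ra vb (by omega)]

theorem interleaveALoop_eq_mergeAlt (ra vb : List Int) :
    interleaveALoop ra vb 0 = mergeAlt ra vb :=
  interleaveALoop_eq_mergeAlt_aux (ra.length + vb.length) ra vb (le_refl _)

-- ===== VERDICT (by name: the statement is the Claim_ definition above) =====
theorem interleave_from_spec : Claim_equal_interleave_from := by
  intro va vb si _
  unfold Spec_interleave_from interleave_from interleave_from_alt
  rw [interleaveALoop_eq_mergeAlt, mergeLoop_eq]
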